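-- pv_equiv track=rewrite | github.com/ivankhpm/Python-for-Data-Quality-Engineers-RUN-10-ivkh | Task4.2.py | max_dict_values
-- ===== SOURCE A (Python) =====
-- def max_dict_values(all_dicts):
--     final_dict = {}
--
--     # Collect all unique keys from all dictionaries to set
--     all_keys = set()
--     for d in all_dicts:
--         all_keys.update(d.keys())
--
--     # Iterate over each unique key
--     for key in all_keys:
--         max_value = 0 # To store max_value
--         max_index = 0 # To srote max index of dictionary
--         count = 0  # To count occurrences of the key across dicts
--
--         #Check every dictionary to find max value and index of dict
--         for index, d in enumerate(all_dicts):
--             if key in d: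
--                 count += 1
--                 if d[key] >= max_value:
--                     max_value = d[key]
--                     max_index = index
--
--         # Determine how to store the key based on its occurrences
--         if count == 1:
--             final_dict[f"{key}"] = max_value
--         else:
--             final_dict[f"{key}_{max_index}"] = max_value
--     return final_dict
-- ===== SOURCE B (Python) =====
-- def max_dict_values(all_dicts):
--     # One pass to group (index, value) occurrences per key, then one pass over the groups.
--     groups = {}
--     for index, d in enumerate(all_dicts):
--         for key, value in d.items():
--             groups.setdefault(key, []).append((index, value))
--
--     result = {}
--     for key, occs in groups.items():
--         max_value, max_index = 0, 0
--         for i, v in occs: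
--             if v >= max_value:
--                 max_value, max_index = v, i
--         name = key if len(occs) == 1 else f"{key}_{max_index}"
--         result[name] = max_value
--     return result
-- ===== Notes on version B (the rewrite author's own statement) =====
-- stated objective: faster
-- what changed: A re-scans every dict once per unique key (collecting keys into a set first); B makes a single grouping pass building key -> list of (index, value), then computes each key's 0-floored last-wins running max and name from its group alone.
import Mathlib
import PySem

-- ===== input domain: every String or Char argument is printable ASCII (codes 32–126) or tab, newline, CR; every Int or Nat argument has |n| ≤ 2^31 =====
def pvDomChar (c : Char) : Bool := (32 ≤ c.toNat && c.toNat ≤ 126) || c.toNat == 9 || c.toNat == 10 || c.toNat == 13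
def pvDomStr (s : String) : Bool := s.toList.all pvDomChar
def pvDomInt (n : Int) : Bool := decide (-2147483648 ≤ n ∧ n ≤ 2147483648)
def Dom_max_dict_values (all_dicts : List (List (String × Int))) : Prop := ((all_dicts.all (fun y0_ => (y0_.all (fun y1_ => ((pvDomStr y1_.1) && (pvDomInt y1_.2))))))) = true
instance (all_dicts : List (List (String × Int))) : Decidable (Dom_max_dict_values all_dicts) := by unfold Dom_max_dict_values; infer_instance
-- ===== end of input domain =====

-- B replaces A's per-key rescans of all dicts by one grouping pass plus one pass over the groups (alternative decomposition).


-- ===== PORT A =====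
-- A-side helper: the body of A's inner 'for index, d in enumerate(all_dicts)' loop for one key;
-- state is (max_value, max_index, count); 'key in d' / 'd[key]' are the one Dict.get? lookup.
def pvKeyScan (key : String) (st : Int × Int × Int) (p : Int × List (String × Int)) : Int × Int × Int :=
  match (PySem.Dict.mk p.2).get? key with
  | some v => if v ≥ st.1 then (v, p.1, st.2.2 + 1) else (st.1, st.2.1, st.2.2 + 1)
  | none => st

def max_dict_values (all_dicts : List (List (String × Int))) : List (String × Int) :=
  -- all_keys = set(); for d in all_dicts: all_keys.update(d.keys())
  let all_keys : PySem.Set String :=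
    all_dicts.foldl (fun s d => PySem.Set.update s (PySem.Dict.mk d).keys) []
  -- for key in all_keys: scan enumerate(all_dicts), then store under key or key_maxindex
  let final : PySem.Dict String Int :=
    all_keys.foldl (fun fd key =>
      let st := (PySem.List.enumerate all_dicts).foldl (pvKeyScan key) (0, 0, 0)
      if st.2.2 == 1 then fd.insert key st.1
      else fd.insert (key ++ "_" ++ PySem.Int.toStr st.2.1) st.1) PySem.Dict.empty
  final.items

-- ===== PORT B =====
-- B-side helper: the per-key fold 'for i, v in occs: if v >= max_value: …' starting from (0, 0).
def pvBMax (occs : List (Int × Int)) : Int × Int :=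
  occs.foldl (fun mm iv => if iv.2 ≥ mm.1 then (iv.2, iv.1) else mm) (0, 0)

def max_dict_values_alt (all_dicts : List (List (String × Int))) : List (String × Int) :=
  -- groups.setdefault(key, []).append((index, value))  =  modify key [] (· ++ [(index, value)])
  let groups : PySem.Dict String (List (Int × Int)) :=
    (PySem.List.enumerate all_dicts).foldl
      (fun g p => p.2.foldl (fun g kv => g.modify kv.1 [] (· ++ [(p.1, kv.2)])) g)
      PySem.Dict.empty
  -- for key, occs in groups.items(): result[name] = max_value
  let res : PySem.Dict String Int :=
    groups.items.foldl (fun r q =>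
      let m := pvBMax q.2
      r.insert (if q.2.length == 1 then q.1 else q.1 ++ "_" ++ PySem.Int.toStr m.2) m.1)
      PySem.Dict.empty
  res.items

-- ===== PRECONDITION & SPEC =====
-- Pre_ excludes inner association lists with duplicate keys: such lists do not represent a Python
-- dict (A's parameters are dicts, which cannot carry duplicate keys), and on them first-match
-- lookup (A's port) and per-pair grouping (B's port) are both defensible readings.
def Pre_max_dict_values (all_dicts : List (List (String × Int))) : Prop :=
  ∀ d ∈ all_dicts, (d.map Prod.fst).Nodup
instance (all_dicts : List (List (String × Int))) : Decidable (Pre_max_dict_values all_dicts) := by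
  unfold Pre_max_dict_values; infer_instance

def pvWitness_max_dict_values : (List (List (String × Int))) :=
  [[("a", 1), ("b", 2)], [("a", 5)]]

def Spec_max_dict_values (all_dicts : List (List (String × Int))) (out : List (String × Int)) : Prop := out = max_dict_values_alt all_dicts
instance (all_dicts : List (List (String × Int))) (out : List (String × Int)) : Decidable (Spec_max_dict_values all_dicts out) := by unfold Spec_max_dict_values; infer_instance

-- ===== CLAIM (what is proved, stated in full; the proofs are below) =====
def Claim_equal_max_dict_values : Prop := ∀ (all_dicts : List (List (String × Int))), Dom_max_dict_values all_dicts → Pre_max_dict_values all_dicts → Spec_max_dict_values all_dicts (max_dict_values all_dicts)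

-- ===== LEMMAS AND PROOFS =====

-- occurrences of key k in ds, starting at index s: the (index, value) pairs B groups under k
def pvOcc (k : String) : List (List (String × Int)) → Int → List (Int × Int)
  | [], _ => []
  | d :: t, s => ((d.filter (fun kv => kv.1 == k)).map (fun kv => (s, kv.2))) ++ pvOcc k t (s + 1)

-- a dict's contribution to pvOcc is its (unique) binding of k, if any
lemma pvOcc_head (k : String) (d : List (String × Int)) (s : Int)
    (hnd : (d.map Prod.fst).Nodup) :
    (d.filter (fun kv => kv.1 == k)).map (fun kv => ((s : Int), kv.2))
      = match (PySem.Dict.mk d).get? k with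
        | some v => [(s, v)]
        | none => [] := by
  induction d with
  | nil => simp [PySem.Dict.get?]
  | cons kv rest ih =>
    simp only [List.map_cons, List.nodup_cons] at hnd
    rw [PySem.Dict.get?_mk_cons]
    by_cases h : kv.1 = k
    · subst h
      have hrest : (rest.filter (fun p => p.1 == kv.1)) = [] := by
        apply List.filter_eq_nil_iff.mpr
        intro p hp hpk
        exact hnd.1 (by
          have : p.1 = kv.1 := by simpa using hpk
          exact this ▸ List.mem_map_of_mem hp)
      simp [hrest]
    · have : (kv.1 == k) = false := by simpa using h
      simp only [List.filter_cons, this, Bool.false_eq_true, if_false]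
      exact ih hnd.2

-- A's per-key scan over enumerate(all_dicts) is B's fold over the occurrence list, plus its count
lemma pvScan_eq_occ (k : String) (ds : List (List (String × Int)))
    (hnd : ∀ d ∈ ds, (d.map Prod.fst).Nodup) :
    ∀ (s : Int) (mv mi c : Int),
    (PySem.List.enumerate ds s).foldl (pvKeyScan k) (mv, mi, c)
      = (((pvOcc k ds s).foldl (fun mm iv => if iv.2 ≥ mm.1 then (iv.2, iv.1) else mm) (mv, mi)).1,
         ((pvOcc k ds s).foldl (fun mm iv => if iv.2 ≥ mm.1 then (iv.2, iv.1) else mm) (mv, mi)).2,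
         c + ((pvOcc k ds s).length : Int)) := by
  induction ds with
  | nil => intro s mv mi c; simp [PySem.List.enumerate, pvOcc]
  | cons d t ih =>
    intro s mv mi c
    have hd := hnd d (by simp)
    have ht : ∀ d' ∈ t, (d'.map Prod.fst).Nodup := fun d' h => hnd d' (by simp [h])
    rw [PySem.List.enumerate_cons]
    simp only [List.foldl_cons, pvOcc, pvOcc_head k d s hd]
    cases hg : (PySem.Dict.mk d).get? k with
    | none =>
      simp only [pvKeyScan, hg]
      rw [ih ht (s + 1) mv mi c]
      simp
    | some v =>
      simp only [pvKeyScan, hg, List.singleton_append, List.foldl_cons, List.length_cons]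
      by_cases hv : v ≥ mv
      · rw [if_pos hv, if_pos hv, ih ht (s + 1) v s (c + 1)]
        simp only [Prod.mk.injEq]
        refine ⟨trivial, trivial, ?_⟩
        push_cast; ring
      · rw [if_neg hv, if_neg hv, ih ht (s + 1) mv mi (c + 1)]
        simp only [Prod.mk.injEq]
        refine ⟨trivial, trivial, ?_⟩
        push_cast; ring

-- B's grouping dict: lookup gives the occurrence list …
lemma pvGroups_getD (ds : List (List (String × Int))) (k : String) :
    ∀ (s : Int) (g : PySem.Dict String (List (Int × Int))),
    ((PySem.List.enumerate ds s).foldl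
        (fun g p => p.2.foldl (fun g kv => g.modify kv.1 [] (· ++ [(p.1, kv.2)])) g) g).getD k []
      = g.getD k [] ++ pvOcc k ds s := by
  induction ds with
  | nil => intro s g; simp [PySem.List.enumerate, pvOcc]
  | cons d t ih =>
    intro s g
    rw [PySem.List.enumerate_cons]
    simp only [List.foldl_cons]
    rw [ih (s + 1)]
    have hinner :
        (d.foldl (fun g kv => g.modify kv.1 [] (· ++ [((s : Int), kv.2)])) g)
          = ((d.map (fun kv => (kv.1, ((s : Int), kv.2)))).foldl
              (fun g p => g.modify p.1 [] (· ++ [p.2])) g) := by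
        rw [List.foldl_map]
    rw [hinner, PySem.Dict.getD_foldl_modify_append]
    simp only [pvOcc, List.append_assoc]
    congr 1
    congr 1
    rw [List.filter_map, List.map_map]
    rfl

-- … and its key list is exactly A's all_keys set
lemma pvGroups_keys (ds : List (List (String × Int))) :
    ∀ (g : PySem.Dict String (List (Int × Int))) (s : Int),
    ((PySem.List.enumerate ds s).foldl
        (fun g p => p.2.foldl (fun g kv => g.modify kv.1 [] (· ++ [(p.1, kv.2)])) g) g).keys
      = ds.foldl (fun st d => PySem.Set.update st (PySem.Dict.mk d).keys) g.keys := by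
  induction ds with
  | nil => intro g s; simp [PySem.List.enumerate]
  | cons d t ih =>
    intro g s
    rw [PySem.List.enumerate_cons]
    simp only [List.foldl_cons]
    rw [ih _ (s + 1)]
    congr 1
    rw [PySem.Dict.keys_foldl_modify_key d (fun kv => kv.1) []
          (fun _ kv => (· ++ [((s : Int), kv.2)])) g]
    rw [PySem.Dict.keys_mk]
    rfl

lemma pvGroups_keys_nodup (ds : List (List (String × Int))) (s : Int)
    (g : PySem.Dict String (List (Int × Int))) (h : g.keys.Nodup) :
    ((PySem.List.enumerate ds s).foldl
        (fun g p => p.2.foldl (fun g kv => g.modify kv.1 [] (· ++ [(p.1, kv.2)])) g) g).keys.Nodup := by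
  induction ds generalizing s g with
  | nil => simpa [PySem.List.enumerate]
  | cons d t ih =>
    rw [PySem.List.enumerate_cons]
    simp only [List.foldl_cons]
    exact ih (s + 1) _ (PySem.Dict.nodup_keys_foldl_modify_key d (fun kv => kv.1) []
      (fun _ kv => (· ++ [((s : Int), kv.2)])) g h)

-- ===== VERDICT (by name: the statement is the Claim_ definition above) =====
theorem max_dict_values_spec : Claim_equal_max_dict_values := by
  intro all_dicts _ hpre
  unfold Spec_max_dict_values max_dict_values max_dict_values_alt
  dsimp only
  set groups : PySem.Dict String (List (Int × Int)) :=
    (PySem.List.enumerate all_dicts).foldl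
      (fun g p => p.2.foldl (fun g kv => g.modify kv.1 [] (· ++ [(p.1, kv.2)])) g)
      PySem.Dict.empty with hgroups
  have hnd : groups.keys.Nodup := by
    rw [hgroups]; exact pvGroups_keys_nodup all_dicts 0 PySem.Dict.empty (by simp [PySem.Dict.keys, PySem.Dict.empty])
  have hkeys : groups.keys
      = all_dicts.foldl (fun st d => PySem.Set.update st (PySem.Dict.mk d).keys) [] := by
    rw [hgroups, pvGroups_keys all_dicts PySem.Dict.empty 0]
    rfl
  rw [PySem.Dict.items_eq_map_keys groups hnd [], List.foldl_map, hkeys]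
  refine congrArg PySem.Dict.items ?_
  apply PySem.List.foldl_congr_mem
  intro fd key _
  have hD : groups.getD key [] = pvOcc key all_dicts 0 := by
    rw [hgroups, pvGroups_getD all_dicts key 0 PySem.Dict.empty]
    simp [PySem.Dict.getD, PySem.Dict.get?, PySem.Dict.empty]
  rw [pvScan_eq_occ key all_dicts hpre 0 0 0 0, hD]
  simp only [pvBMax, zero_add]
  by_cases hlen : (pvOcc key all_dicts 0).length = 1
  · simp [hlen]
  · have h1 : (((pvOcc key all_dicts 0).length : Int) == 1) = false := by
      simp only [beq_eq_false_iff_ne, ne_eq]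
      exact_mod_cast hlen
    have h2 : ((pvOcc key all_dicts 0).length == 1) = false := by
      simpa using hlen
    simp [h1, h2]
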